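-- pv_equiv track=rewrite | github.com/SakshiI10/Python-DSA | Arrays/37_Ishaan_Loves_Chocolates.py | chocolates
-- ===== SOURCE A (Python) =====
-- def chocolates(n, arr):
--     left, right = 0, n - 1
--
--     while left < right:
--         if arr[left] >= arr[right]:
--             left += 1
--         else:
--             right -= 1
--
--     return arr[left]
-- ===== SOURCE B (Python) =====
-- def chocolates(n, arr):
--     best = arr[0]
--     for i in range(1, n):
--         if arr[i] < best:
--             best = arr[i]
--     return best
-- ===== Notes on version B (the rewrite author's own statement) =====
-- stated objective: simpler
-- what changed: Replaces the two-pointer convergence loop (which returns the minimum of arr[0:n]) with a single left-to-right running-minimum scan.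
import Mathlib
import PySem

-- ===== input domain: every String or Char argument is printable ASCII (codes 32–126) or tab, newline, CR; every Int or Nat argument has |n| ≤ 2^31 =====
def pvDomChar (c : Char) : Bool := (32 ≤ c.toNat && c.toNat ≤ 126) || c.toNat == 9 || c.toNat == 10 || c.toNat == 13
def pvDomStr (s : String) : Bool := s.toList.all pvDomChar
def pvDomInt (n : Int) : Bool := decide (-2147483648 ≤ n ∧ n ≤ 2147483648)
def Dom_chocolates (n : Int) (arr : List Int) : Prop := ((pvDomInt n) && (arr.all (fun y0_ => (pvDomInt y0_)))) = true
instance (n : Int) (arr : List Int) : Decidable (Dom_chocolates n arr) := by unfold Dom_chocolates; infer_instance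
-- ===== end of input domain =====

-- B replaces A's two-pointer convergence loop with a single running-minimum scan (same O(n) cost, simpler).


-- ===== PORT A =====
-- the while loop of A; `none` from pyGet? is Python's IndexError, excluded by Pre_ (default 0 unreachable there)
def chocLoop (arr : List Int) (left right : Int) : Int :=
  if _h : left < right then
    match PySem.List.pyGet? arr left, PySem.List.pyGet? arr right with
    | some a, some b =>
        if a ≥ b then chocLoop arr (left + 1) right else chocLoop arr left (right - 1)
    | _, _ => 0
  else
    (PySem.List.pyGet? arr left).getD 0
termination_by (right - left).toNat
decreasing_by all_goals omega

def chocolates (n : Int) (arr : List Int) : Int :=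
  chocLoop arr 0 (n - 1)

-- ===== PORT B =====
def chocolates_alt (n : Int) (arr : List Int) : Int :=
  (PySem.List.pyRange 1 n 1).foldl
    (fun best i =>
      match PySem.List.pyGet? arr i with
      | some v => if v < best then v else best
      | none => best)
    ((PySem.List.pyGet? arr 0).getD 0)

-- ===== PRECONDITION & SPEC =====
-- Pre_ excludes exactly the inputs where Python A raises IndexError: empty arr, or n past the end.
def Pre_chocolates (n : Int) (arr : List Int) : Prop := arr ≠ [] ∧ n ≤ (arr.length : Int)
instance (n : Int) (arr : List Int) : Decidable (Pre_chocolates n arr) := by unfold Pre_chocolates; infer_instance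
def pvWitness_chocolates : Int × List Int := (3, [5, 2, 9])
def Spec_chocolates (n : Int) (arr : List Int) (out : Int) : Prop := out = chocolates_alt n arr
instance (n : Int) (arr : List Int) (out : Int) : Decidable (Spec_chocolates n arr out) := by unfold Spec_chocolates; infer_instance

-- ===== CLAIM (what is proved, stated in full; the proofs are below) =====
def Claim_equal_chocolates : Prop := ∀ (n : Int) (arr : List Int), Dom_chocolates n arr → Pre_chocolates n arr → Spec_chocolates n arr (chocolates n arr)

-- ===== LEMMAS AND PROOFS =====

-- the segment minimum both loops compute: min of arr[i] over i in [l, r]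
def segMin (arr : List Int) (l r : Int) : Int :=
  if _h : l < r then min (arr.getD l.toNat 0) (segMin arr (l + 1) r)
  else arr.getD l.toNat 0
termination_by (r - l).toNat
decreasing_by omega

theorem pyGet?_in (arr : List Int) (i : Int) (h0 : 0 ≤ i) (h1 : i < (arr.length : Int)) :
    PySem.List.pyGet? arr i = some (arr.getD i.toNat 0) := by
  rw [PySem.List.pyGet?_of_nonneg _ h0]
  rw [List.getElem?_eq_getElem (by omega), List.getD_eq_getElem _ _ (by omega)]

theorem segMin_cons (arr : List Int) (l r : Int) (h : l < r) :
    segMin arr l r = min (arr.getD l.toNat 0) (segMin arr (l + 1) r) := by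
  rw [segMin, dif_pos h]

theorem segMin_self (arr : List Int) (l : Int) : segMin arr l l = arr.getD l.toNat 0 := by
  rw [segMin]; simp

theorem segMin_snoc (arr : List Int) :
    ∀ (k : Nat) (l r : Int), (r - l).toNat = k → l < r →
      segMin arr l r = min (segMin arr l (r - 1)) (arr.getD r.toNat 0) := by
  intro k
  induction k with
  | zero => intro l r hk h; omega
  | succ k ih =>
    intro l r hk h
    rw [segMin_cons arr l r h]
    by_cases h1 : l + 1 < r
    · rw [ih (l + 1) r (by omega) h1, ← min_assoc, ← segMin_cons arr l (r - 1) (by omega)]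
    · have : r = l + 1 := by omega
      subst this
      rw [show l + 1 - 1 = l by ring, segMin_self, segMin_self]

theorem segMin_le_left (arr : List Int) (l r : Int) (h : l ≤ r) :
    segMin arr l r ≤ arr.getD l.toNat 0 := by
  rcases lt_or_eq_of_le h with h | h
  · rw [segMin_cons arr l r h]; exact min_le_left _ _
  · subst h; rw [segMin_self]

theorem segMin_le_right (arr : List Int) (l r : Int) (h : l ≤ r) :
    segMin arr l r ≤ arr.getD r.toNat 0 := by
  rcases lt_or_eq_of_le h with h | h
  · rw [segMin_snoc arr (r - l).toNat l r rfl h]; exact min_le_right _ _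
  · subst h; rw [segMin_self]

-- A's loop computes the segment minimum
theorem chocLoop_eq_segMin (arr : List Int) :
    ∀ (k : Nat) (l r : Int), (r - l).toNat = k → 0 ≤ l → l ≤ r → r < (arr.length : Int) →
      chocLoop arr l r = segMin arr l r := by
  intro k
  induction k with
  | zero =>
    intro l r hk h0 hlr hr
    have hlr' : l = r := by omega
    subst hlr'
    rw [chocLoop]
    simp only [lt_irrefl, dite_false]
    rw [pyGet?_in arr l h0 hr, segMin_self]
    rfl
  | succ k ih =>
    intro l r hk h0 hlr hr
    have hlt : l < r := by omega
    rw [chocLoop, dif_pos hlt, pyGet?_in arr l h0 (by omega), pyGet?_in arr r (by omega) hr]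
    simp only
    by_cases hge : arr.getD r.toNat 0 ≤ arr.getD l.toNat 0
    · rw [if_pos hge, ih (l + 1) r (by omega) (by omega) (by omega) hr,
        segMin_cons arr l r hlt]
      have := segMin_le_right arr (l + 1) r (by omega)
      omega
    · rw [if_neg hge, ih l (r - 1) (by omega) h0 (by omega) (by omega),
        segMin_snoc arr (r - l).toNat l r rfl hlt]
      have := segMin_le_left arr l (r - 1) (by omega)
      omega

-- B's fold computes the segment minimum of [0, k]
theorem alt_eq_segMin (arr : List Int) :
    ∀ (k : Nat), (k : Int) < (arr.length : Int) →
      chocolates_alt ((k : Int) + 1) arr = segMin arr 0 (k : Int) := by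
  intro k
  induction k with
  | zero =>
    intro hk
    unfold chocolates_alt
    have h0 : (0 : Int) < (arr.length : Int) := by exact_mod_cast hk
    rw [show ((0 : Nat) : Int) + 1 = (1 : Int) by norm_num, PySem.List.pyRange_one]
    rw [show ((1 : Int) - 1).toNat = 0 by norm_num]
    simp only [List.range_zero, List.map_nil, List.foldl_nil]
    rw [pyGet?_in arr 0 le_rfl h0]
    simp [segMin_self]
  | succ k ih =>
    intro hk
    unfold chocolates_alt at ih ⊢
    have hstep : PySem.List.pyRange 1 (((k + 1 : Nat) : Int) + 1) 1
        = PySem.List.pyRange 1 ((k : Int) + 1) 1 ++ [((k : Int) + 1)] := by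
      push_cast
      exact PySem.List.pyRange_one_succ_right (by omega)
    rw [hstep, List.foldl_append, ih (by push_cast at hk ⊢; omega)]
    simp only [List.foldl]
    rw [pyGet?_in arr ((k : Int) + 1) (by positivity) (by push_cast at hk ⊢; omega)]
    have hsnoc := segMin_snoc arr (((k + 1 : Nat) : Int) - 0).toNat 0 ((k + 1 : Nat) : Int)
      rfl (by positivity)
    push_cast at hsnoc ⊢
    rw [hsnoc, show (k : Int) + 1 - 1 = (k : Int) by ring]
    have := segMin_le_right arr 0 (k : Int) (by positivity)
    rw [Int.min_def]
    split_ifs <;> omega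

theorem alt_small (n : Int) (arr : List Int) (h : n ≤ 1) :
    chocolates_alt n arr = (PySem.List.pyGet? arr 0).getD 0 := by
  unfold chocolates_alt
  rw [PySem.List.pyRange_one]
  rw [show (n - 1).toNat = 0 by omega]
  rfl

-- ===== VERDICT (by name: the statement is the Claim_ definition above) =====
theorem chocolates_spec : Claim_equal_chocolates := by
  intro n arr _hd hpre
  obtain ⟨hne, hlen⟩ := hpre
  have hlen0 : 0 < (arr.length : Int) := by
    cases arr with
    | nil => exact absurd rfl hne
    | cons a t => simp
  unfold Spec_chocolates chocolates
  by_cases hn : n ≤ 1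
  · rw [alt_small n arr hn, chocLoop]
    have : ¬ (0 : Int) < n - 1 := by omega
    rw [dif_neg this]
  · have hn2 : 2 ≤ n := by omega
    have hk : ∃ k : Nat, n = (k : Int) + 1 ∧ (k : Int) < (arr.length : Int) := by
      refine ⟨(n - 1).toNat, by omega, by omega⟩
    obtain ⟨k, hkeq, hklt⟩ := hk
    subst hkeq
    rw [show (k : Int) + 1 - 1 = (k : Int) by ring,
      alt_eq_segMin arr k hklt,
      chocLoop_eq_segMin arr k 0 (k : Int) (by omega) le_rfl (by positivity) hklt]
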